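-- pv_equiv track=rewrite | github.com/DanielRustrum/HomeLab-Web-App-Development-Template | src/orchestrator/main.py | diff_tsx_changes
-- ===== SOURCE A (Python) =====
-- def diff_tsx_changes(
--     before: dict[str, int],
--     after: dict[str, int],
-- ) -> tuple[bool, bool]:
--     """Return (tsx_changed, tsx_set_changed) based on route snapshots."""
--     before_tsx = {k: v for k, v in before.items() if k.endswith(".tsx")}
--     after_tsx = {k: v for k, v in after.items() if k.endswith(".tsx")}
--     tsx_set_changed = set(before_tsx) != set(after_tsx)
--     tsx_changed = tsx_set_changed or before_tsx != after_tsx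
--     return tsx_changed, tsx_set_changed
-- ===== SOURCE B (Python) =====
-- def diff_tsx_changes(
--     before: dict[str, int],
--     after: dict[str, int],
-- ) -> tuple[bool, bool]:
--     """Return (tsx_changed, tsx_set_changed) based on route snapshots."""
--     tsx_changed = False
--     tsx_set_changed = False
--     for k, v in before.items():
--         if k.endswith(".tsx"):
--             if k not in after:
--                 tsx_set_changed = True
--             elif v != after[k]:
--                 tsx_changed = True
--     for k in after:
--         if k.endswith(".tsx") and k not in before:
--             tsx_set_changed = True
--     return tsx_changed or tsx_set_changed, tsx_set_changed
-- ===== Notes on version B (the rewrite author's own statement) =====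
-- stated objective: simpler
-- what changed: Instead of materialising two filtered sub-dicts and comparing them as sets and as dicts, B makes one flag-accumulating pass over before's items (presence/value check against after) plus one pass over after's keys for additions, building no intermediate containers.
import Mathlib
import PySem

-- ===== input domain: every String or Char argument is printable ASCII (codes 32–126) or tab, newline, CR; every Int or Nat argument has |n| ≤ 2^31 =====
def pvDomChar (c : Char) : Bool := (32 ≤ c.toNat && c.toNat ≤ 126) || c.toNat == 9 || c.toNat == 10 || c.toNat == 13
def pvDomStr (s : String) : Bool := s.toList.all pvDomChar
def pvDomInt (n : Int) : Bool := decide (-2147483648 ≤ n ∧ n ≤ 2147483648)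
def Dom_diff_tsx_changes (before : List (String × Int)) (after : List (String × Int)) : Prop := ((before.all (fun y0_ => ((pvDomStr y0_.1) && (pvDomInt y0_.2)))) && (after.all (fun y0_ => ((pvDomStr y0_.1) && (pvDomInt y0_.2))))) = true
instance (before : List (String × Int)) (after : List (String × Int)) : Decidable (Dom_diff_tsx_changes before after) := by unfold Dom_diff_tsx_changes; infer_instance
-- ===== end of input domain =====

-- B replaces A's two filtered sub-dicts + set/dict comparisons by two flag-accumulating
-- passes (one over before's items, one over after's keys) that build no intermediate dicts.


-- ===== PORT A =====
-- the dict comprehension {k: v for k, v in l.items() if k.endswith(".tsx")}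
def pvTsxDict (l : List (String × Int)) : PySem.Dict String Int :=
  l.foldl (fun d p => if PySem.Str.endswith p.1 ".tsx" then d.insert p.1 p.2 else d)
    PySem.Dict.empty

-- Python's order-insensitive dict == : same key set and same value at every key
def pvPyDictEq (d1 d2 : PySem.Dict String Int) : Bool :=
  PySem.Set.equal (PySem.Set.ofList d1.keys) (PySem.Set.ofList d2.keys) &&
    d1.keys.all (fun k => d1.get? k == d2.get? k)

def diff_tsx_changes (before : List (String × Int)) (after : List (String × Int)) : Bool × Bool :=
  let before_tsx := pvTsxDict before
  let after_tsx := pvTsxDict after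
  let tsx_set_changed :=
    !(PySem.Set.equal (PySem.Set.ofList before_tsx.keys) (PySem.Set.ofList after_tsx.keys))
  let tsx_changed := tsx_set_changed || !(pvPyDictEq before_tsx after_tsx)
  (tsx_changed, tsx_set_changed)

-- ===== PORT B =====
def diff_tsx_changes_alt (before : List (String × Int)) (after : List (String × Int)) : Bool × Bool :=
  -- first loop: over before's items (acc = (tsx_changed, tsx_set_changed))
  let s := before.foldl
    (fun (acc : Bool × Bool) p =>
      if PySem.Str.endswith p.1 ".tsx" then
        match after.find? (fun q => q.1 == p.1) with     -- dict lookup: k in after / after[k]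
        | none => (acc.1, true)
        | some q => if p.2 ≠ q.2 then (true, acc.2) else acc
      else acc)
    (false, false)
  -- second loop: over after's keys, for keys added
  let s := after.foldl
    (fun (acc : Bool × Bool) q =>
      if PySem.Str.endswith q.1 ".tsx" && (before.find? (fun p => p.1 == q.1)).isNone
      then (acc.1, true) else acc)
    s
  (s.1 || s.2, s.2)

-- ===== PRECONDITION & SPEC =====
-- Pre_ admits exactly the association lists that encode a Python dict (distinct keys);
-- a duplicate-key list corresponds to no dict argument A can receive, so nothing is claimed there.
def Pre_diff_tsx_changes (before : List (String × Int)) (after : List (String × Int)) : Prop :=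
  (before.map Prod.fst).Nodup ∧ (after.map Prod.fst).Nodup
instance (before : List (String × Int)) (after : List (String × Int)) : Decidable (Pre_diff_tsx_changes before after) := by unfold Pre_diff_tsx_changes; infer_instance

def pvWitness_diff_tsx_changes : (List (String × Int)) × (List (String × Int)) :=
  ([("a.tsx", 1), ("b.ts", 2)], [("a.tsx", 2)])

def Spec_diff_tsx_changes (before : List (String × Int)) (after : List (String × Int)) (out : Bool × Bool) : Prop := out = diff_tsx_changes_alt before after
instance (before : List (String × Int)) (after : List (String × Int)) (out : Bool × Bool) : Decidable (Spec_diff_tsx_changes before after out) := by unfold Spec_diff_tsx_changes; infer_instance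

-- ===== CLAIM (what is proved, stated in full; the proofs are below) =====
def Claim_equal_diff_tsx_changes : Prop := ∀ (before : List (String × Int)) (after : List (String × Int)), Dom_diff_tsx_changes before after → Pre_diff_tsx_changes before after → Spec_diff_tsx_changes before after (diff_tsx_changes before after)

-- ===== LEMMAS AND PROOFS =====

-- abbreviations for the three per-element tests B's folds accumulate
def pvF1 (after : List (String × Int)) (p : String × Int) : Bool :=
  PySem.Str.endswith p.1 ".tsx" &&
    (match after.find? (fun q => q.1 == p.1) with
     | none => false
     | some q => p.2 != q.2)

def pvG1 (after : List (String × Int)) (p : String × Int) : Bool :=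
  PySem.Str.endswith p.1 ".tsx" && (after.find? (fun q => q.1 == p.1)).isNone

def pvG2 (before : List (String × Int)) (q : String × Int) : Bool :=
  PySem.Str.endswith q.1 ".tsx" && (before.find? (fun p => p.1 == q.1)).isNone

theorem pv_fold1 (after l : List (String × Int)) (a b : Bool) :
    l.foldl
      (fun (acc : Bool × Bool) p =>
        if PySem.Str.endswith p.1 ".tsx" then
          match after.find? (fun q => q.1 == p.1) with
          | none => (acc.1, true)
          | some q => if p.2 ≠ q.2 then (true, acc.2) else acc
        else acc)
      (a, b)
    = (a || l.any (pvF1 after), b || l.any (pvG1 after)) := by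
  induction l generalizing a b with
  | nil => simp
  | cons p t ih =>
    simp only [List.foldl_cons, List.any_cons]
    by_cases hc : PySem.Str.endswith p.1 ".tsx" = true
    · rw [if_pos hc]
      cases hF : after.find? (fun q => q.1 == p.1) with
      | none =>
        simp only [hF]
        rw [ih]
        simp only [pvF1, pvG1, hc, hF, Option.isNone_none, Bool.true_and,
          Bool.false_or, Bool.true_or, Bool.or_true]
      | some q =>
        simp only [hF]
        by_cases hv : p.2 = q.2
        · rw [if_neg (by simpa using hv)]
          rw [ih]
          have hbne : (p.2 != q.2) = false := by simp [hv]
          simp only [pvF1, pvG1, hc, hF, hbne, Option.isNone_some, Bool.true_and,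
            Bool.and_false, Bool.false_or]
        · rw [if_pos hv]
          rw [ih]
          have hbne : (p.2 != q.2) = true := bne_iff_ne.mpr hv
          simp only [pvF1, pvG1, hc, hF, hbne, Option.isNone_some, Bool.true_and,
            Bool.and_false, Bool.true_or, Bool.or_true, Bool.false_or, Bool.or_assoc]
    · rw [if_neg hc]
      rw [ih]
      have hc' : PySem.Str.endswith p.1 ".tsx" = false := by simpa using hc
      simp only [pvF1, pvG1, hc', Bool.false_and, Bool.false_or]

theorem pv_fold2 (before l : List (String × Int)) (a b : Bool) :
    l.foldl
      (fun (acc : Bool × Bool) q =>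
        if PySem.Str.endswith q.1 ".tsx" && (before.find? (fun p => p.1 == q.1)).isNone
        then (acc.1, true) else acc)
      (a, b)
    = (a, b || l.any (pvG2 before)) := by
  induction l generalizing a b with
  | nil => simp
  | cons q t ih =>
    simp only [List.foldl_cons, List.any_cons]
    by_cases hc : (PySem.Str.endswith q.1 ".tsx" && (before.find? (fun p => p.1 == q.1)).isNone) = true
    · rw [if_pos hc]
      rw [ih]
      simp only [pvG2, hc, Bool.true_or, Bool.or_true]
    · rw [if_neg hc]
      rw [ih]
      have hc' : (PySem.Str.endswith q.1 ".tsx" && (before.find? (fun p => p.1 == q.1)).isNone) = false := by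
        simpa using hc
      simp only [pvG2, hc', Bool.false_or]

-- find? through the tsx filter: for a key that itself ends in ".tsx" the filter removes no candidate
theorem pv_find?_filter (l : List (String × Int)) (k : String)
    (hk : PySem.Str.endswith k ".tsx" = true) :
    (l.filter (fun q => PySem.Str.endswith q.1 ".tsx")).find? (fun q => q.1 == k)
      = l.find? (fun q => q.1 == k) := by
  induction l with
  | nil => simp
  | cons p t ih =>
    simp only [List.filter_cons]
    by_cases hc : PySem.Str.endswith p.1 ".tsx" = true
    · rw [if_pos hc]
      by_cases hp : p.1 = k
      · rw [List.find?_cons_of_pos (by simpa using hp),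
          List.find?_cons_of_pos (by simpa using hp)]
      · rw [List.find?_cons_of_neg (by simpa using hp),
          List.find?_cons_of_neg (by simpa using hp), ih]
    · rw [if_neg hc]
      by_cases hp : p.1 = k
      · exact absurd (hp ▸ hk) hc
      · rw [List.find?_cons_of_neg (by simpa using hp), ih]

theorem pv_find?_of_mem (l : List (String × Int)) (p : String × Int)
    (h : (l.map Prod.fst).Nodup) (hm : p ∈ l) :
    l.find? (fun q => q.1 == p.1) = some p := by
  induction l with
  | nil => simp at hm
  | cons a t ih =>
    simp only [List.map_cons, List.nodup_cons] at h
    rcases List.mem_cons.mp hm with rfl | hm'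
    · simp [List.find?]
    · have hne : a.1 ≠ p.1 := by
        intro he
        exact h.1 (he ▸ List.mem_map.mpr ⟨p, hm', rfl⟩)
      rw [List.find?_cons_of_neg (by simpa using hne), ih h.2 hm']

theorem pv_find?_eq_none_iff (l : List (String × Int)) (k : String) :
    l.find? (fun q => q.1 == k) = none ↔ k ∉ l.map Prod.fst := by
  rw [List.find?_eq_none]
  simp only [List.mem_map]
  constructor
  · rintro h ⟨p, hp, rfl⟩
    exact (h p hp) (by simp)
  · intro h p hp hbe
    exact h ⟨p, hp, by simpa using hbe⟩

-- the dict comprehension over distinct keys is just the filtered item list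
theorem pv_tsxDict_eq (l : List (String × Int)) (h : (l.map Prod.fst).Nodup) :
    pvTsxDict l = PySem.Dict.mk (l.filter (fun p => PySem.Str.endswith p.1 ".tsx")) := by
  apply PySem.Dict.ext
  show (pvTsxDict l).items = _
  unfold pvTsxDict
  rw [← List.foldl_filter,
    PySem.Dict.items_foldl_insert_fresh _ Prod.fst Prod.snd _
      (fun a _ => PySem.Dict.contains_empty _)
      ((List.filter_sublist.map Prod.fst).nodup h)]
  simp [PySem.Dict.empty]

-- ===== VERDICT (by name: the statement is the Claim_ definition above) =====
theorem diff_tsx_changes_spec : Claim_equal_diff_tsx_changes := by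
  intro before after _ hpre
  obtain ⟨h1, h2⟩ := hpre
  unfold Spec_diff_tsx_changes diff_tsx_changes diff_tsx_changes_alt pvPyDictEq
  rw [pv_tsxDict_eq before h1, pv_tsxDict_eq after h2]
  simp only [pv_fold1, pv_fold2, Bool.false_or, PySem.Dict.keys_mk]
  set cb := List.filter (fun p => PySem.Str.endswith p.1 ".tsx") before with hcb
  set ca := List.filter (fun p => PySem.Str.endswith p.1 ".tsx") after with hca
  have hnb : (List.map (fun x => x.1) cb).Nodup := (List.filter_sublist.map _).nodup h1
  have hna : (List.map (fun x => x.1) ca).Nodup := (List.filter_sublist.map _).nodup h2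
  rw [PySem.Set.ofList_eq_self_of_nodup _ hnb, PySem.Set.ofList_eq_self_of_nodup _ hna]
  -- membership in the filtered key lists
  have memK : ∀ (l : List (String × Int)) (k : String),
      k ∈ List.map (fun x => x.1) (List.filter (fun p => PySem.Str.endswith p.1 ".tsx") l) ↔
        ∃ p ∈ l, p.1 = k ∧ PySem.Str.endswith k ".tsx" = true := by
    intro l k
    constructor
    · intro hm
      rcases List.mem_map.mp hm with ⟨p, hp, rfl⟩
      rcases List.mem_filter.mp hp with ⟨hpb, hpt⟩
      exact ⟨p, hpb, rfl, hpt⟩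
    · rintro ⟨p, hpb, rfl, ht⟩
      exact List.mem_map.mpr ⟨p, List.mem_filter.mpr ⟨hpb, ht⟩, rfl⟩
  -- B's set-changed flag, as a proposition
  have hQ : (before.any (pvG1 after) || after.any (pvG2 before)) = true ↔
      (∃ p ∈ before, PySem.Str.endswith p.1 ".tsx" = true ∧ p.1 ∉ after.map Prod.fst) ∨
      (∃ q ∈ after, PySem.Str.endswith q.1 ".tsx" = true ∧ q.1 ∉ before.map Prod.fst) := by
    simp only [Bool.or_eq_true, List.any_eq_true, pvG1, pvG2, Bool.and_eq_true,
      Option.isNone_iff_eq_none, pv_find?_eq_none_iff]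
  -- key-set inequality ↔ B's set-changed proposition
  have hset : (¬ ∀ x : String, x ∈ List.map (fun x => x.1) cb ↔ x ∈ List.map (fun x => x.1) ca) ↔
      ((∃ p ∈ before, PySem.Str.endswith p.1 ".tsx" = true ∧ p.1 ∉ after.map Prod.fst) ∨
       (∃ q ∈ after, PySem.Str.endswith q.1 ".tsx" = true ∧ q.1 ∉ before.map Prod.fst)) := by
    constructor
    · intro hne
      rcases not_forall.mp hne with ⟨k, hk⟩
      rw [hcb, hca, memK before k, memK after k] at hk
      by_cases hb : ∃ p ∈ before, p.1 = k ∧ PySem.Str.endswith k ".tsx" = true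
      · rcases hb with ⟨p, hp, rfl, ht⟩
        refine Or.inl ⟨p, hp, ht, fun hmem => ?_⟩
        rcases List.mem_map.mp hmem with ⟨q, hq, hq1⟩
        exact hk (iff_of_true ⟨p, hp, rfl, ht⟩ ⟨q, hq, hq1, ht⟩)
      · have ha : ∃ q ∈ after, q.1 = k ∧ PySem.Str.endswith k ".tsx" = true := by
          by_contra hna'
          exact hk (iff_of_false hb hna')
        rcases ha with ⟨q, hq, rfl, ht⟩
        refine Or.inr ⟨q, hq, ht, fun hmem => ?_⟩
        rcases List.mem_map.mp hmem with ⟨p, hp, hp1⟩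
        exact hb ⟨p, hp, hp1, ht⟩
    · rintro (⟨p, hp, ht, hnin⟩ | ⟨q, hq, ht, hnin⟩) <;> intro hall
      · have hmem := (hall p.1).mp ((memK before p.1).mpr ⟨p, hp, rfl, ht⟩)
        rcases (memK after p.1).mp hmem with ⟨q, hq, hq1, _⟩
        exact hnin (List.mem_map.mpr ⟨q, hq, hq1⟩)
      · have hmem := (hall q.1).mpr ((memK after q.1).mpr ⟨q, hq, rfl, ht⟩)
        rcases (memK before q.1).mp hmem with ⟨p, hp, hp1, _⟩
        exact hnin (List.mem_map.mpr ⟨p, hp, hp1⟩)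
  -- the second component: A's set-changed equals B's
  have hsnd : (!PySem.Set.equal (List.map (fun x => x.1) cb) (List.map (fun x => x.1) ca)) =
      (before.any (pvG1 after) || after.any (pvG2 before)) := by
    cases hE : PySem.Set.equal (List.map (fun x => x.1) cb) (List.map (fun x => x.1) ca) with
    | true =>
      have hP := (PySem.Set.equal_iff _ _).mp hE
      cases hR : (before.any (pvG1 after) || after.any (pvG2 before)) with
      | false => rfl
      | true => exact absurd hP (hset.mpr (hQ.mp hR))
    | false =>
      have hnP : ¬ ∀ x : String, x ∈ List.map (fun x => x.1) cb ↔ x ∈ List.map (fun x => x.1) ca := by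
        intro hP
        rw [(PySem.Set.equal_iff _ _).mpr hP] at hE
        exact absurd hE (by decide)
      rw [hQ.mpr (hset.mp hnP)]
      rfl
  refine Prod.ext ?_ hsnd
  -- the first component
  rw [← hsnd]
  cases hE : PySem.Set.equal (List.map (fun x => x.1) cb) (List.map (fun x => x.1) ca) with
  | false => simp
  | true =>
    have hP := (PySem.Set.equal_iff _ _).mp hE
    simp only [Bool.not_true, Bool.false_or, Bool.or_false, Bool.true_and]
    -- remains: !(values all equal) = before.any (pvF1 after), given equal key sets
    cases hV : (List.map (fun x => x.1) cb).all
        (fun k => PySem.Dict.get? { items := cb } k == PySem.Dict.get? { items := ca } k) with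
    | false =>
      simp only [Bool.not_false]
      symm
      rcases List.all_eq_false.mp hV with ⟨k, hkmem, hkne⟩
      rcases (memK before k).mp (hcb ▸ hkmem) with ⟨p, hp, rfl, ht⟩
      have hfb : PySem.Dict.get? { items := cb } p.1 = some p.2 := by
        show (cb.find? (fun q => q.1 == p.1)).map (fun x => x.2) = some p.2
        rw [hcb, pv_find?_filter _ _ ht, pv_find?_of_mem before p h1 hp]
        rfl
      cases hF : after.find? (fun q => q.1 == p.1) with
      | none =>
        exfalso
        have hnin := (pv_find?_eq_none_iff after p.1).mp hF
        have hmem := (hP p.1).mp ((memK before p.1).mpr ⟨p, hp, rfl, ht⟩)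
        rcases (memK after p.1).mp (hca ▸ hmem) with ⟨q, hq, hq1, _⟩
        exact hnin (List.mem_map.mpr ⟨q, hq, hq1⟩)
      | some q =>
        have hfa : PySem.Dict.get? { items := ca } p.1 = some q.2 := by
          show (ca.find? (fun q => q.1 == p.1)).map (fun x => x.2) = some q.2
          rw [hca, pv_find?_filter _ _ ht, hF]
          rfl
        have hne : p.2 ≠ q.2 := by
          intro he
          exact hkne (by rw [hfb, hfa, he]; simp)
        refine List.any_eq_true.mpr ⟨p, hp, ?_⟩
        simp only [pvF1, ht, hF, Bool.true_and]
        exact bne_iff_ne.mpr hne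
    | true =>
      simp only [Bool.not_true]
      symm
      rw [List.any_eq_false]
      rintro p hp
      simp only [pvF1, Bool.and_eq_true, not_and]
      intro ht
      cases hF : after.find? (fun q => q.1 == p.1) with
      | none => simp
      | some q =>
        simp only
        have hkmem : p.1 ∈ List.map (fun x => x.1) cb :=
          hcb ▸ (memK before p.1).mpr ⟨p, hp, rfl, ht⟩
        have hall := List.all_eq_true.mp hV _ hkmem
        have hfb : PySem.Dict.get? { items := cb } p.1 = some p.2 := by
          show (cb.find? (fun q => q.1 == p.1)).map (fun x => x.2) = some p.2
          rw [hcb, pv_find?_filter _ _ ht, pv_find?_of_mem before p h1 hp]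
          rfl
        have hfa : PySem.Dict.get? { items := ca } p.1 = some q.2 := by
          show (ca.find? (fun q => q.1 == p.1)).map (fun x => x.2) = some q.2
          rw [hca, pv_find?_filter _ _ ht, hF]
          rfl
        rw [hfb, hfa] at hall
        simpa using hall
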